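-- pv_equiv track=rewrite | github.com/HttpTesting/pyhttp | httptesting/library/scripts.py | parse_output_parameters
-- ===== SOURCE A (Python) =====
-- def parse_output_parameters(params):
--     """
--     Parse the test case output parameters.
--
--     Args:
--         params: res[0].tr.id
--     Example:
--         ret = parse_output_parameters('result.res.data[0].id')
--         e.g. Data.tr.id => Data['tr']['id']
--              res.tr.id => res['tr]['id]
--              res[0].tr.id => res[0]['tr']['id']
--              cookie.SESSION => cookie['SESSION']
--              headers.Content-Type => headers['Content-Type']
--     """
--     param_list = params.split(".")
--
--     # Interception object.
--     param_obj = param_list[0]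
--     param_list.pop(0)
--
--     # Template string.
--     template = "['{}']"
--     parse_string = ''
--     # Parse the test case output parameters.
--     for args in param_list:
--         if "[" in args:
--             left_string = ''
--             for num, val in enumerate(args.split("[")):
--                 if num == 0:
--                     val = "['{}']".format(val)
--                 left_string = left_string + val + "["
--             left_string = (left_string[:-1])
--             parse_string = parse_string + left_string
--         else:
--             parse_string = parse_string + template.format(args)
--     ret_string = param_obj + parse_string
--     return ret_string
-- ===== SOURCE B (Python) =====
-- def parse_output_parameters(params):
--     """Single left-to-right scan: copy characters verbatim, except each '.'
--     starts a name (up to the next '.' or '[') that is emitted as ['name']."""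
--     out = []
--     i, n = 0, len(params)
--     while i < n:
--         c = params[i]
--         if c == '.':
--             j = i + 1
--             while j < n and params[j] != '.' and params[j] != '[':
--                 j += 1
--             out.append("['" + params[i + 1:j] + "']")
--             i = j
--         else:
--             out.append(c)
--             i += 1
--     return ''.join(out)
-- ===== Notes on version B (the rewrite author's own statement) =====
-- stated objective: simpler
-- what changed: Replaced split('.')-then-loop with a nested per-segment split('[')/enumerate/slice pass by a single left-to-right character scan that copies characters and rewrites each '.name' to ['name'] in place.
import Mathlib
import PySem

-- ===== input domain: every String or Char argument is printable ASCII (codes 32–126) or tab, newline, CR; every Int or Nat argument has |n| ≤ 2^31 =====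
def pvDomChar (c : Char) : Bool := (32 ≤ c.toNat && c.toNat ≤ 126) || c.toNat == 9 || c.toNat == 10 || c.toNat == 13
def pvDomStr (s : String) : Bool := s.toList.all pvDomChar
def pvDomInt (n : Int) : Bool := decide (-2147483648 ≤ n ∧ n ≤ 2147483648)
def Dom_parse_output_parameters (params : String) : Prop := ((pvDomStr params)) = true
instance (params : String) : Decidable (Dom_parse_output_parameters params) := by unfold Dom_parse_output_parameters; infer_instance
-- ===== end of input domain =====

-- ===== PORT A =====
-- B replaces A's split('.')+nested split('[')/enumerate/slice loops by one left-to-right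
-- character scan ('simpler'); return values proved equal on every input.
def parse_output_parameters (params : String) : String :=
  let param_list := (PySem.Str.split? params ".").getD []  -- sep "." is nonempty: never none
  match param_list with
  | [] => ""  -- unreachable: Python split with a separator never returns an empty list
  | param_obj :: rest =>
    let parse_string := rest.foldl (fun parse_string args =>
      if PySem.Str.isIn "[" args then
        let left_string :=
          (PySem.List.enumerate ((PySem.Str.split? args "[").getD [])).foldl
            (fun left_string nv =>
              left_string ++ (if nv.1 = 0 then "['" ++ nv.2 ++ "']" else nv.2) ++ "[") ""
        let left_string := PySem.Str.slice left_string none (some (-1))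
        parse_string ++ left_string
      else
        parse_string ++ ("['" ++ args ++ "']")) ""
    param_obj ++ parse_string

-- ===== PORT B =====
-- scan, as in Source B: copy a character; at '.', take the run up to the next '.'/'[' as a name
def pvScanB (l : List Char) : List Char :=
  match l with
  | [] => []
  | c :: rest =>
    if c = '.' then
      ('[' :: '\'' :: rest.takeWhile (fun d => d != '.' && d != '[') ++ ['\'', ']']) ++
        pvScanB (rest.dropWhile (fun d => d != '.' && d != '['))
    else c :: pvScanB rest
termination_by l.length
decreasing_by
  · have := List.length_dropWhile_le (fun d => d != '.' && d != '[') rest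
    simp; omega
  · simp

def parse_output_parameters_alt (params : String) : String :=
  String.ofList (pvScanB params.toList)

-- ===== PRECONDITION & SPEC =====
def Spec_parse_output_parameters (params : String) (out : String) : Prop := out = parse_output_parameters_alt params
instance (params : String) (out : String) : Decidable (Spec_parse_output_parameters params out) := by unfold Spec_parse_output_parameters; infer_instance

-- ===== CLAIM (what is proved, stated in full; the proofs are below) =====
def Claim_equal_parse_output_parameters : Prop := ∀ (params : String), Dom_parse_output_parameters params → Spec_parse_output_parameters params (parse_output_parameters params)

-- ===== LEMMAS AND PROOFS =====

def pvSplitCAux (c0 : Char) : List Char → List Char → List (List Char)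
  | [], cur => [cur.reverse]
  | c :: t, cur => if c = c0 then cur.reverse :: pvSplitCAux c0 t [] else pvSplitCAux c0 t (c :: cur)

def pvSplitC (c0 : Char) (l : List Char) : List (List Char) := pvSplitCAux c0 l []

def pvWrapU (seg : List Char) : List Char :=
  '[' :: '\'' :: seg.takeWhile (fun d => d != '[') ++ '\'' :: ']' :: seg.dropWhile (fun d => d != '[')

theorem pv_go_eq (c0 : Char) : ∀ (fuel : Nat) (l cur : List Char) (acc : List (List Char)),
    l.length ≤ fuel →
    PySem.Chars.splitOn.go [c0] fuel l cur acc = acc.reverse ++ pvSplitCAux c0 l cur := by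
  intro fuel
  induction fuel with
  | zero =>
    intro l cur acc h
    have : l = [] := by cases l <;> simp at h ⊢
    subst this
    simp [PySem.Chars.splitOn.go, pvSplitCAux]
  | succ n ih =>
    intro l cur acc h
    cases l with
    | nil => simp [PySem.Chars.splitOn.go, pvSplitCAux]
    | cons c rest =>
      simp only [PySem.Chars.splitOn.go, List.isPrefixOf, pvSplitCAux]
      by_cases hc : c = c0
      · subst hc
        simp only [beq_self_eq_true, Bool.true_and, List.isPrefixOf_nil_left, if_pos, if_true]
        rw [ih _ _ _ (by simp at h ⊢; omega)]
        simp
      · have hbeq : (c0 == c) = false := by simp [beq_eq_false_iff_ne]; exact fun e => hc e.symm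
        simp only [hbeq, Bool.false_and, if_neg, Bool.false_eq_true, not_false_eq_true, hc, if_false]
        exact ih _ _ _ (by simp at h ⊢; omega)

theorem pv_splitOn_eq (c0 : Char) (l : List Char) :
    PySem.Chars.splitOn l [c0] = pvSplitC c0 l := by
  unfold PySem.Chars.splitOn pvSplitC
  exact pv_go_eq c0 _ l [] [] (by omega)

theorem pv_split?_eq (s : String) (sep : String) (c0 : Char) (h : sep.toList = [c0]) :
    PySem.Str.split? s sep = some ((pvSplitC c0 s.toList).map String.ofList) := by
  unfold PySem.Str.split? PySem.Chars.split?
  rw [h]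
  simp [pv_splitOn_eq]

theorem pvSplitCAux_eq (c0 : Char) : ∀ (l cur : List Char),
    pvSplitCAux c0 l cur = (pvSplitC c0 l).modifyHead (cur.reverse ++ ·) := by
  intro l
  induction l with
  | nil => intro cur; simp [pvSplitC, pvSplitCAux]
  | cons c t ih =>
    intro cur
    by_cases hc : c = c0
    · subst hc
      simp only [pvSplitC, pvSplitCAux, if_pos trivial, List.modifyHead_cons, List.reverse_nil,
        List.append_nil]
    · simp only [pvSplitC, pvSplitCAux, if_neg hc]
      rw [ih (c :: cur), ih [c]]
      cases h : pvSplitCAux c0 t [] with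
      | nil => simp [pvSplitC, h]
      | cons p ps => simp [pvSplitC, h]

theorem pvSplitC_cons (c0 c : Char) (t : List Char) :
    pvSplitC c0 (c :: t) =
      if c = c0 then [] :: pvSplitC c0 t else (pvSplitC c0 t).modifyHead (c :: ·) := by
  by_cases hc : c = c0
  · subst hc; simp [pvSplitC, pvSplitCAux]
  · simp only [pvSplitC, pvSplitCAux, if_neg hc]
    rw [pvSplitCAux_eq c0 t [c]]
    rfl

theorem pvSplitC_spec (c0 : Char) : ∀ (l : List Char),
    pvSplitC c0 l = l.takeWhile (fun d => d != c0) ::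
      (match l.dropWhile (fun d => d != c0) with
       | [] => []
       | _ :: t => pvSplitC c0 t) := by
  intro l
  induction l with
  | nil => rfl
  | cons c t ih =>
    rw [pvSplitC_cons]
    by_cases hc : c = c0
    · subst hc
      rw [if_pos rfl]
      rw [List.takeWhile_cons_of_neg (by simp), List.dropWhile_cons_of_neg (by simp)]
    · have hb : (c != c0) = true := by simp [bne_iff_ne]; exact hc
      rw [if_neg hc, ih]
      simp only [List.takeWhile_cons, List.dropWhile_cons, hb, if_true, List.modifyHead_cons]

theorem pvSplitC_flat (c0 : Char) : ∀ (l : List Char),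
    (pvSplitC c0 l).flatMap (c0 :: ·) = c0 :: l := by
  intro l
  induction l with
  | nil => rfl
  | cons c t ih =>
    rw [pvSplitC_cons]
    by_cases hc : c = c0
    · subst hc; rw [if_pos rfl]; simp only [List.flatMap_cons, ih]; rfl
    · rw [if_neg hc]
      rw [pvSplitC_spec c0 t] at ih ⊢
      simp only [List.modifyHead_cons, List.flatMap_cons, List.cons_append, List.cons.injEq,
        true_and] at ih ⊢
      exact ih

theorem pvSplitC_tail_flat (c0 : Char) (l : List Char) (ps : List (List Char))
    (h : pvSplitC c0 l = l.takeWhile (fun d => d != c0) :: ps) :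
    ps.flatMap (c0 :: ·) = l.dropWhile (fun d => d != c0) := by
  have hf := pvSplitC_flat c0 l
  rw [h] at hf
  simp only [List.flatMap_cons, List.cons_append, List.cons.injEq, true_and] at hf
  have h2 : l.takeWhile (fun d => d != c0) ++ ps.flatMap (c0 :: ·)
      = l.takeWhile (fun d => d != c0) ++ l.dropWhile (fun d => d != c0) := by
    rw [hf, List.takeWhile_append_dropWhile]
  exact List.append_cancel_left h2

theorem pv_shift (ps : List (List Char)) :
    '[' :: ps.flatMap (fun x => x ++ ['[']) = ps.flatMap (fun x => '[' :: x) ++ ['['] := by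
  induction ps with
  | nil => rfl
  | cons p ps ih =>
    simp only [List.flatMap_cons, List.cons_append, List.append_assoc, List.nil_append, ← ih]

theorem pv_enum_foldl : ∀ (ps : List String) (s : Int) (a : String), 1 ≤ s →
    (PySem.List.enumerate ps s).foldl
      (fun left_string nv =>
        left_string ++ (if nv.1 = 0 then "['" ++ nv.2 ++ "']" else nv.2) ++ "[") a
    = a ++ String.ofList (ps.flatMap (fun x => x.toList ++ ['['])) := by
  intro ps
  induction ps with
  | nil => intro s a _; simp [PySem.List.enumerate]
  | cons p ps ih =>
    intro s a hs
    rw [PySem.List.enumerate_cons, List.foldl_cons, ih (s+1) _ (by omega)]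
    rw [if_neg (by omega)]
    simp only [List.flatMap_cons]
    conv_lhs => rw [show p = String.ofList p.toList from (String.ofList_toList (s := p)).symm,
      show "[" = String.ofList ['['] from rfl]
    simp only [String.ofList_append, ← String.append_assoc]

theorem pv_dropLast_form (X : List Char) (ps : List (List Char)) :
    (X ++ ['['] ++ ps.flatMap (fun x => x ++ ['['])).dropLast
      = X ++ ps.flatMap (fun x => '[' :: x) := by
  rw [List.append_assoc, List.singleton_append, pv_shift, ← List.append_assoc,
    List.dropLast_concat]

theorem pv_dropWhile_ne_nil (s : String) (h : PySem.Str.isIn "[" s = true) :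
    s.toList.dropWhile (fun d => d != '[') ≠ [] := by
  rw [PySem.Str.isIn_eq, show ("[" : String).toList = ['['] from rfl, PySem.Chars.isIn_iff_infix,
    List.singleton_infix_iff] at h
  intro hd
  rw [List.dropWhile_eq_nil_iff] at hd
  have := hd _ h
  simp at this

theorem pv_stepA (parse_string args : String) :
    (if PySem.Str.isIn "[" args then
        let left_string :=
          (PySem.List.enumerate ((PySem.Str.split? args "[").getD [])).foldl
            (fun left_string nv =>
              left_string ++ (if nv.1 = 0 then "['" ++ nv.2 ++ "']" else nv.2) ++ "[") ""
        let left_string := PySem.Str.slice left_string none (some (-1))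
        parse_string ++ left_string
      else
        parse_string ++ ("['" ++ args ++ "']"))
    = parse_string ++ String.ofList (pvWrapU args.toList) := by
  by_cases hIn : PySem.Str.isIn "[" args = true
  · rw [if_pos hIn]
    simp only
    rw [pv_split?_eq args "[" '[' rfl, Option.getD_some]
    have hspec := pvSplitC_spec '[' args.toList
    cases hd : args.toList.dropWhile (fun d => d != '[') with
    | nil => exact absurd hd (pv_dropWhile_ne_nil args hIn)
    | cons c t =>
      rw [hd] at hspec
      rw [hspec]
      simp only [List.map_cons, PySem.List.enumerate_cons, List.foldl_cons, zero_add,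
        if_pos trivial]
      rw [pv_enum_foldl _ 1 _ (by omega)]
      have hdrop : (pvSplitC '[' t).flatMap ('[' :: ·)
          = args.toList.dropWhile (fun d => d != '[') :=
        pvSplitC_tail_flat '[' args.toList _ hspec
      apply String.toList_inj.mp
      simp only [String.toList_append, PySem.Str.slice_to_neg_one, String.toList_ofList,
        List.flatMap_map, Function.comp]
      rw [show ("" : String).toList = [] from rfl,
        show ("['" : String).toList = ['[', '\''] from rfl,
        show ("']" : String).toList = ['\'', ']'] from rfl,
        show ("[" : String).toList = ['['] from rfl]
      simp only [List.nil_append]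
      rw [pv_dropLast_form, hdrop, hd]
      unfold pvWrapU
      simp [hd]
  · rw [if_neg hIn]
    have hmem : ¬ '[' ∈ args.toList := by
      intro hmem
      apply hIn
      rw [PySem.Str.isIn_eq, show ("[" : String).toList = ['['] from rfl,
        PySem.Chars.isIn_iff_infix]
      exact List.singleton_infix_iff '[' args.toList |>.mpr hmem
    have htk : args.toList.takeWhile (fun d => d != '[') = args.toList := by
      rw [List.takeWhile_eq_self_iff]
      intro a ha
      simp only [bne_iff_ne, ne_eq]
      exact fun e => hmem (e ▸ ha)
    have hdw : args.toList.dropWhile (fun d => d != '[') = [] := by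
      rw [List.dropWhile_eq_nil_iff]
      intro a ha
      simp only [bne_iff_ne, ne_eq]
      exact fun e => hmem (e ▸ ha)
    apply String.toList_inj.mp
    simp only [String.toList_append, String.toList_ofList]
    unfold pvWrapU
    rw [htk, hdw,
      show ("['" : String).toList = ['[', '\''] from rfl,
      show ("']" : String).toList = ['\'', ']'] from rfl]
    simp

theorem pvScanB_copy : ∀ (p r : List Char), (∀ c ∈ p, c ≠ '.') →
    pvScanB (p ++ r) = p ++ pvScanB r := by
  intro p
  induction p with
  | nil => intro r _; rfl
  | cons c p ih =>
    intro r h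
    have hc : c ≠ '.' := h c (by simp)
    rw [List.cons_append, pvScanB, if_neg hc, ih r (fun d hd => h d (by simp [hd]))]
    rfl

theorem pv_dropWhile_split (t : List Char) :
    t.dropWhile (fun d => d != '.' && d != '[') =
      (t.takeWhile (fun d => d != '.')).dropWhile (fun d => d != '[') ++
        t.dropWhile (fun d => d != '.') := by
  induction t with
  | nil => rfl
  | cons c t ih =>
    by_cases hdot : c = '.'
    · subst hdot
      rw [List.dropWhile_cons_of_neg (by simp), List.takeWhile_cons_of_neg (by simp),
        List.dropWhile_cons_of_neg (by simp)]
      rfl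
    · by_cases hbr : c = '['
      · subst hbr
        rw [List.dropWhile_cons_of_neg (by simp), List.takeWhile_cons_of_pos (by simp),
          List.dropWhile_cons_of_neg (by simp), List.dropWhile_cons_of_pos (by simp)]
        rw [List.cons_append, List.takeWhile_append_dropWhile]
      · have h1 : (c != '.' && c != '[') = true := by simp [bne_iff_ne]; exact ⟨hdot, hbr⟩
        have h2 : (c != '.') = true := by simp [bne_iff_ne]; exact hdot
        have h3 : (c != '[') = true := by simp [bne_iff_ne]; exact hbr
        simp only [List.dropWhile_cons, List.takeWhile_cons, h2, h3, Bool.and_self,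
          Bool.and_true, Bool.true_and, if_true, ih]

theorem pv_takeWhile_split (t : List Char) :
    t.takeWhile (fun d => d != '.' && d != '[') =
      (t.takeWhile (fun d => d != '.')).takeWhile (fun d => d != '[') := by
  induction t with
  | nil => rfl
  | cons c t ih =>
    by_cases hdot : c = '.'
    · subst hdot
      rw [List.takeWhile_cons_of_neg (by simp), List.takeWhile_cons_of_neg (by simp)]
      rfl
    · by_cases hbr : c = '['
      · subst hbr
        rw [List.takeWhile_cons_of_neg (by simp), List.takeWhile_cons_of_pos (by simp),
          List.takeWhile_cons_of_neg (by simp)]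
      · have h1 : (c != '.' && c != '[') = true := by simp [bne_iff_ne]; exact ⟨hdot, hbr⟩
        have h2 : (c != '.') = true := by simp [bne_iff_ne]; exact hdot
        have h3 : (c != '[') = true := by simp [bne_iff_ne]; exact hbr
        simp only [List.takeWhile_cons, h2, h3, Bool.and_self, Bool.and_true, Bool.true_and,
          if_true, ih]

theorem pvScanB_dot : ∀ (n : Nat) (t : List Char), t.length ≤ n →
    pvScanB ('.' :: t) = (pvSplitC '.' t).flatMap pvWrapU := by
  intro n
  induction n with
  | zero =>
    intro t h
    have ht : t = [] := by cases t <;> simp at h ⊢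
    subst ht
    simp [pvScanB, pvSplitC, pvSplitCAux, pvWrapU]
  | succ n ih =>
    intro t h
    rw [pvScanB, if_pos rfl]
    rw [pvSplitC_spec '.' t]
    set s0 := t.takeWhile (fun d => d != '.') with hs0
    have hs0nd : ∀ c ∈ s0, c ≠ '.' := by
      intro c hc
      have := List.mem_takeWhile_imp hc
      simpa [bne_iff_ne] using this
    have hdnd : ∀ c ∈ s0.dropWhile (fun d => d != '['), c ≠ '.' := by
      intro c hc
      exact hs0nd c ((List.dropWhile_sublist _).mem hc)
    rw [pv_takeWhile_split, pv_dropWhile_split, ← hs0]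
    rw [pvScanB_copy _ _ hdnd]
    simp only [List.flatMap_cons]
    cases hd : t.dropWhile (fun d => d != '.') with
    | nil =>
      simp only [pvScanB]
      unfold pvWrapU
      simp
    | cons c' t' =>
      have hc' : c' = '.' := by
        have h0 := List.head?_dropWhile_not (fun d => d != '.') t
        rw [hd] at h0
        simpa [bne_iff_ne] using h0
      subst hc'
      have hlen : t'.length ≤ n := by
        have h1 := List.length_dropWhile_le (fun d => d != '.') t
        rw [hd] at h1
        simp at h1
        omega
      rw [ih t' hlen]
      unfold pvWrapU
      simp

theorem pv_main (l : List Char) :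
    pvScanB l = l.takeWhile (fun d => d != '.') ++
      (match l.dropWhile (fun d => d != '.') with
       | [] => []
       | _ :: t => (pvSplitC '.' t).flatMap pvWrapU) := by
  have hnd : ∀ c ∈ l.takeWhile (fun d => d != '.'), c ≠ '.' := by
    intro c hc
    have := List.mem_takeWhile_imp hc
    simpa [bne_iff_ne] using this
  conv_lhs => rw [← List.takeWhile_append_dropWhile (p := fun d => d != '.') (l := l)]
  rw [pvScanB_copy _ _ hnd]
  congr 1
  cases hd : l.dropWhile (fun d => d != '.') with
  | nil => simp [pvScanB]
  | cons c' t' =>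
    have hc' : c' = '.' := by
      have h0 := List.head?_dropWhile_not (fun d => d != '.') l
      rw [hd] at h0
      simpa [bne_iff_ne] using h0
    subst hc'
    exact pvScanB_dot t'.length t' (le_refl _)


theorem pv_foldlA : ∀ (l : List String) (a : String),
    l.foldl (fun parse_string args =>
      if PySem.Str.isIn "[" args then
        let left_string :=
          (PySem.List.enumerate ((PySem.Str.split? args "[").getD [])).foldl
            (fun left_string nv =>
              left_string ++ (if nv.1 = 0 then "['" ++ nv.2 ++ "']" else nv.2) ++ "[") ""
        let left_string := PySem.Str.slice left_string none (some (-1))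
        parse_string ++ left_string
      else
        parse_string ++ ("['" ++ args ++ "']")) a
    = a ++ String.ofList (l.flatMap (fun x => pvWrapU x.toList)) := by
  intro l
  induction l with
  | nil => intro a; simp
  | cons x l ih =>
    intro a
    rw [List.foldl_cons, pv_stepA, ih]
    simp only [List.flatMap_cons, ← String.ofList_append, String.append_assoc]

-- ===== VERDICT (by name: the statement is the Claim_ definition above) =====
theorem parse_output_parameters_spec : Claim_equal_parse_output_parameters := by
  intro params _
  unfold Spec_parse_output_parameters parse_output_parameters parse_output_parameters_alt
  rw [pv_split?_eq params "." '.' rfl]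
  rw [pvSplitC_spec '.' params.toList]
  simp only [Option.getD_some, List.map_cons]
  rw [pv_foldlA]
  rw [pv_main params.toList]
  apply String.toList_inj.mp
  simp only [String.toList_append, String.toList_ofList, List.flatMap_map, Function.comp]
  cases hd : params.toList.dropWhile (fun d => d != '.') <;>
    simp [String.toList_ofList]
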